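-- pv_equiv track=rewrite | github.com/hodge-py/Coding_assignments | Assignment 5/question_1.py | alphanumFind
-- ===== SOURCE A (Python) =====
-- def alphanumFind(value,alphanum): #the other functions work in a similar way as the first function just with a different ord() constraint.
--     tmp = ''
--     for x in range(len(value)-1):
--         tmp += value[x]
--
--         if ord(value[x]) in range(65,123) or ord(value[x]) in range(48,58) or ord(value[x]) == 46:
--             pass
--         else:
--             return False
--
--     alphanum.append(tmp)
--
--     return True
-- ===== SOURCE B (Python) =====
-- def alphanumFind(value, alphanum):
--     allowed = frozenset(chr(c) for c in list(range(48, 58)) + list(range(65, 123)) + [46])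
--     substr = value[:-1]
--     if not set(substr) <= allowed:
--         return False
--     alphanum.append(substr)
--     return True
-- ===== Notes on version B (the rewrite author's own statement) =====
-- stated objective: idiomatic
-- what changed: Replaces A's character-by-character validation loop with early return and an incrementally built accumulator by a single slice value[:-1] plus one set-subset test against a precomputed frozenset of allowed characters.
import Mathlib
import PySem

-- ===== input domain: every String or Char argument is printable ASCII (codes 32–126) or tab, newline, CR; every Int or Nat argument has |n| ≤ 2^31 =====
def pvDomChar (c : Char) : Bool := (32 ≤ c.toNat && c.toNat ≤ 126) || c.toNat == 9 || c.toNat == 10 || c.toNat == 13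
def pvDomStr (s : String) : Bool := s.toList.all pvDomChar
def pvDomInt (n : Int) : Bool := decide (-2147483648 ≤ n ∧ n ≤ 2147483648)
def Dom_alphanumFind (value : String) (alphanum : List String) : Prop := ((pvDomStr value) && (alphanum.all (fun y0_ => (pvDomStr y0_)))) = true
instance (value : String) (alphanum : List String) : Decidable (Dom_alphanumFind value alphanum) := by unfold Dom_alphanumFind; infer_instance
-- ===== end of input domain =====

-- B replaces A's element-wise early-return loop with a slice plus one set-subset test (objective: idiomatic).
-- Both programs append value[:-1] to alphanum exactly when they return True; the equivalence proved is about the return value.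


-- ===== PORT A =====
-- A's loop: for x in range(len(value)-1), accumulate tmp += value[x], validate value[x], early return False.
-- The characters visited are exactly value.toList.dropLast (range(len-1) for the empty string is empty).
def alphanumFindLoop (tmp : List Char) : List Char → Bool
  | [] => true
  | c :: rest =>
    if ((65 : Int) ≤ (c.toNat : Int) ∧ (c.toNat : Int) < 123) ∨
       ((48 : Int) ≤ (c.toNat : Int) ∧ (c.toNat : Int) < 58) ∨
       ((c.toNat : Int) = 46) then
      alphanumFindLoop (tmp ++ [c]) rest
    else
      false

def alphanumFind (value : String) (alphanum : List String) : Bool :=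
  alphanumFindLoop [] value.toList.dropLast

-- ===== PORT B =====
-- allowed = frozenset(chr(c) for c in list(range(48,58)) + list(range(65,123)) + [46])
def pvAllowed : PySem.Set Char :=
  PySem.Set.ofList
    ((PySem.List.pyRange 48 58 1 ++ PySem.List.pyRange 65 123 1 ++ [(46 : Int)]).map
      (fun i => Char.ofNat i.toNat))

-- substr = value[:-1]; if not set(substr) <= allowed: return False; alphanum.append(substr); return True
def alphanumFind_alt (value : String) (alphanum : List String) : Bool :=
  let substr := PySem.List.slice value.toList none (some (-1))
  if ¬ (PySem.Set.issubset (PySem.Set.ofList substr) pvAllowed) then false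
  else true

-- ===== PRECONDITION & SPEC =====
def Spec_alphanumFind (value : String) (alphanum : List String) (out : Bool) : Prop := out = alphanumFind_alt value alphanum
instance (value : String) (alphanum : List String) (out : Bool) : Decidable (Spec_alphanumFind value alphanum out) := by unfold Spec_alphanumFind; infer_instance

-- ===== CLAIM (what is proved, stated in full; the proofs are below) =====
def Claim_equal_alphanumFind : Prop := ∀ (value : String) (alphanum : List String), Dom_alphanumFind value alphanum → Spec_alphanumFind value alphanum (alphanumFind value alphanum)

-- ===== LEMMAS AND PROOFS =====

-- the per-character test A performs
def pvGood (c : Char) : Bool :=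
  decide (((65 : Int) ≤ (c.toNat : Int) ∧ (c.toNat : Int) < 123) ∨
          ((48 : Int) ≤ (c.toNat : Int) ∧ (c.toNat : Int) < 58) ∨
          ((c.toNat : Int) = 46))

lemma alphanumFindLoop_eq_all (cs : List Char) : ∀ tmp, alphanumFindLoop tmp cs = cs.all pvGood := by
  induction cs with
  | nil => intro tmp; rfl
  | cons c rest ih =>
    intro tmp
    simp only [alphanumFindLoop, List.all_cons, pvGood]
    split_ifs with h
    · rw [ih, decide_eq_true h, Bool.true_and]
    · rw [decide_eq_false h, Bool.false_and]

lemma pvToNat_ofNat (n : Nat) (h : n < 55296) : (Char.ofNat n).toNat = n := by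
  first
  | exact Char.toNat_ofNat_of_lt h
  | simp [Char.toNat_ofNat, Nat.isValidChar, h]

lemma mem_pvAllowed_iff (c : Char) :
    c ∈ pvAllowed ↔
      (((65 : Int) ≤ (c.toNat : Int) ∧ (c.toNat : Int) < 123) ∨
       ((48 : Int) ≤ (c.toNat : Int) ∧ (c.toNat : Int) < 58) ∨
       ((c.toNat : Int) = 46)) := by
  unfold pvAllowed
  rw [PySem.Set.mem_ofList]
  simp only [List.mem_map, List.mem_append, List.mem_singleton, PySem.List.mem_pyRange_one]
  constructor
  · rintro ⟨i, hi, rfl⟩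
    have h0 : 0 ≤ i ∧ i < 123 := by rcases hi with (⟨h1, h2⟩ | ⟨h1, h2⟩) | rfl <;> omega
    have ht : (Char.ofNat i.toNat).toNat = i.toNat := pvToNat_ofNat i.toNat (by omega)
    rw [ht]
    rcases hi with (⟨h1, h2⟩ | ⟨h1, h2⟩) | rfl <;> omega
  · intro hP
    refine ⟨(c.toNat : Int), by omega, ?_⟩
    simp [Char.ofNat_toNat]

lemma contains_pvAllowed (c : Char) : pvAllowed.contains c = pvGood c := by
  have h1 : pvAllowed.contains c = decide (c ∈ pvAllowed) := by simp [PySem.Set.contains]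
  rw [h1]
  unfold pvGood
  exact decide_eq_decide.mpr (mem_pvAllowed_iff c)

lemma all_ofList_eq (M : List Char) : (PySem.Set.ofList M).all pvGood = M.all pvGood := by
  rw [Bool.eq_iff_iff]
  simp only [List.all_eq_true]
  constructor
  · intro h x hx
    exact h x ((PySem.Set.mem_ofList M x).mpr hx)
  · intro h x hx
    exact h x ((PySem.Set.mem_ofList M x).mp hx)

lemma issubset_pvAllowed (M : List Char) :
    PySem.Set.issubset (PySem.Set.ofList M) pvAllowed = M.all pvGood := by
  have h : PySem.Set.issubset (PySem.Set.ofList M) pvAllowed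
      = (PySem.Set.ofList M).all (fun c => pvAllowed.contains c) := by
    simp [PySem.Set.issubset]
  rw [h]
  simp only [contains_pvAllowed]
  exact all_ofList_eq M

-- ===== VERDICT (by name: the statement is the Claim_ definition above) =====
theorem alphanumFind_spec : Claim_equal_alphanumFind := by
  intro value alphanum _
  unfold Spec_alphanumFind alphanumFind alphanumFind_alt
  rw [PySem.List.slice_to_neg_one, alphanumFindLoop_eq_all]
  simp only [issubset_pvAllowed]
  cases value.toList.dropLast.all pvGood <;> simp
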